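-- pv_equiv track=rewrite | github.com/anglebinbin/Barista-tool | gui/main_window/docks/plotter/plot_canvas.py | handleNonPositives
-- ===== SOURCE A (Python) =====
-- def handleNonPositives(yValues):
--     allNonPositive = []
--     for i in range(0,len(yValues)):
--         for j in range(0,len(yValues[i])):
--             if len(allNonPositive) < j + 1:
--                 allNonPositive.append(True)
--             if yValues[i][j] > 0:
--                 allNonPositive[j] = False
--     for i in range(0,len(yValues)):
--         yValues[i] = [yValues[i][j] for j in range(0,len(allNonPositive)) if not allNonPositive[j]]
--     return yValues
-- ===== SOURCE B (Python) =====
-- def handleNonPositives(yValues):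
--     # Recursive column peeling: strip the first column of all rows, recurse on the
--     # tails, and cons the heads back on iff some head is positive. Rows are then
--     # rebound in place (same mutation as the original).
--     def peel(rows):
--         if not any(rows):
--             return [[] for _ in rows]
--         tails = peel([r[1:] for r in rows])
--         if any(r and r[0] > 0 for r in rows):
--             return [[r[0]] + t for r, t in zip(rows, tails)]
--         return tails
--     result = peel(yValues)
--     for i in range(len(yValues)):
--         yValues[i] = result[i]
--     return yValues
-- ===== Notes on version B (the rewrite author's own statement) =====
-- stated objective: alternative
-- what changed: Replaces the row-major incrementally grown boolean mask plus per-row index-range filtering with a recursive column-peeling: strip the first column of every row, recurse on the tails, and cons the heads back on only when some head is positive; no mask, no indices, no range scans.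
import Mathlib
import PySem

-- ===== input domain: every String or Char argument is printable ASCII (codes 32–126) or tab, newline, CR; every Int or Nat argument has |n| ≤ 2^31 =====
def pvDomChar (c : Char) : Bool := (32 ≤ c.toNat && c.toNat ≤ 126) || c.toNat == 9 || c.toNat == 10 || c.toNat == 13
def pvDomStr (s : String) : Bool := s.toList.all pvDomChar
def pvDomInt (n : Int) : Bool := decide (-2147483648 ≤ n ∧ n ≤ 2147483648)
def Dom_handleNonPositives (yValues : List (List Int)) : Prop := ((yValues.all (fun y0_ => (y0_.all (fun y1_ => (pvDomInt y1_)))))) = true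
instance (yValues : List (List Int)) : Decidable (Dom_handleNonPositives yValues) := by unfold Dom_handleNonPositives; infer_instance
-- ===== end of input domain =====

-- B replaces A's incrementally grown boolean mask with a recursive column-peeling (alternative
-- decomposition). Both A and B rebind yValues[i] in place; the equivalence proved here is about
-- the RETURN value (B performs the same mutation).

-- ===== PORT A =====
-- inner loop 'for j in range(0,len(yValues[i]))': j always in range, so row.getD j 0 = row[j]
def pvRowStep (mask : List Bool) (row : List Int) : List Bool :=
  (List.range row.length).foldl
    (fun m j =>
      let m' := if m.length < j + 1 then m ++ [true] else m
      if row.getD j 0 > 0 then m'.set j false else m')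
    mask

def handleNonPositives (yValues : List (List Int)) : List (List Int) :=
  let allNonPositive := yValues.foldl pvRowStep []
  -- second loop: 'yValues[i][j]' may be OUT of range on ragged rows (Python raises IndexError);
  -- the getD 0 default is reached only outside Pre_handleNonPositives
  yValues.map (fun row =>
    (List.range allNonPositive.length).foldl
      (fun acc j => if allNonPositive.getD j true then acc else acc ++ [row.getD j 0]) [])

-- ===== PORT B =====
-- termination measure for the peeling recursion: total number of elements
theorem pvSumTail_le (rows : List (List Int)) :
    ((rows.map List.tail).map List.length).sum ≤ (rows.map List.length).sum := by
  induction rows with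
  | nil => simp
  | cons r rs ih => cases r <;> simp_all <;> omega

theorem pvSumTail_lt (rows : List (List Int)) (h : rows.any (fun r => !r.isEmpty) = true) :
    ((rows.map List.tail).map List.length).sum < (rows.map List.length).sum := by
  induction rows with
  | nil => simp at h
  | cons r rs ih =>
    cases r with
    | nil =>
      simp only [List.any_cons, List.isEmpty_nil] at h
      simp only [List.map_cons, List.tail_nil, List.length_nil, List.sum_cons]
      have := ih (by simpa using h)
      omega
    | cons a t =>
      have := pvSumTail_le rs
      simp_all
      omega

-- 'if not any(rows): return [[] for _ in rows]'; else peel tails and, if some head is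
-- positive, cons the heads back on. 'r[0]' on an empty row (Python IndexError) is reached
-- only outside Pre_handleNonPositives; headD 0 is its total stand-in there.
def pvPeel (rows : List (List Int)) : List (List Int) :=
  if h : rows.any (fun r => !r.isEmpty) = true then
    let tails := pvPeel (rows.map List.tail)
    if rows.any (fun r => !r.isEmpty && decide (r.headD 0 > 0)) then
      (rows.zip tails).map (fun p => p.1.headD 0 :: p.2)
    else tails
  else rows.map (fun _ => [])
termination_by (rows.map List.length).sum
decreasing_by simpa using pvSumTail_lt rows h

def handleNonPositives_alt (yValues : List (List Int)) : List (List Int) :=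
  let result := pvPeel yValues
  -- the final Python loop rebinds yValues[i] := result[i] for every i (len(result) =
  -- len(yValues)), so the returned value is result
  result

-- ===== PRECONDITION & SPEC =====
-- characterisation helpers shared by Pre_ and the proofs
def pvMaxLen (yValues : List (List Int)) : Nat :=
  yValues.foldl (fun m r => max m r.length) 0

def pvColPos (yValues : List (List Int)) (j : Nat) : Bool :=
  yValues.any (fun r => decide (j < r.length) && decide (r.getD j 0 > 0))

-- Pre_ excludes exactly the ragged inputs on which Python A (and Python B alike) RAISES
-- IndexError: a kept column index (some row has a positive value there) that is out of
-- range for a shorter row.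
def Pre_handleNonPositives (yValues : List (List Int)) : Prop :=
  ∀ j ∈ List.range (pvMaxLen yValues), pvColPos yValues j = true →
    ∀ row ∈ yValues, j < row.length
instance (yValues : List (List Int)) : Decidable (Pre_handleNonPositives yValues) := by
  unfold Pre_handleNonPositives; infer_instance

def pvWitness_handleNonPositives : List (List Int) := [[1, -2, 3], [0, 5, -1]]

def Spec_handleNonPositives (yValues : List (List Int)) (out : List (List Int)) : Prop := out = handleNonPositives_alt yValues
instance (yValues : List (List Int)) (out : List (List Int)) : Decidable (Spec_handleNonPositives yValues out) := by unfold Spec_handleNonPositives; infer_instance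

-- ===== CLAIM (what is proved, stated in full; the proofs are below) =====
def Claim_equal_handleNonPositives : Prop := ∀ (yValues : List (List Int)), Dom_handleNonPositives yValues → Pre_handleNonPositives yValues → Spec_handleNonPositives yValues (handleNonPositives yValues)

-- ===== LEMMAS AND PROOFS =====

-- the kept column indices: the common characterisation both ports are reduced to
def pvKeep (yValues : List (List Int)) : List Nat :=
  (List.range (pvMaxLen yValues)).filter (pvColPos yValues)

theorem pvGetD_append_true (l : List Bool) (j : Nat) :
    (l ++ [true]).getD j true = l.getD j true := by
  rcases lt_trichotomy j l.length with h | h | h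
  · simp [List.getD, List.getElem?_append_left h]
  · subst h
    simp [List.getD]
  · have h1 : (l ++ [true]).length ≤ j := by simp; omega
    simp [List.getD, List.getElem?_eq_none h1,
      List.getElem?_eq_none (by omega : l.length ≤ j)]

theorem pvGetD_set (l : List Bool) (i : Nat) (a : Bool) (j : Nat) (d : Bool) :
    (l.set i a).getD j d = if i = j ∧ i < l.length then a else l.getD j d := by
  simp [List.getD, List.getElem?_set]
  split_ifs <;> simp_all
  omega

theorem pvDecide_succ (j n : Nat) (hj : j ≠ n) : decide (j < n + 1) = decide (j < n) := by
  by_cases h : j < n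
  · simp [h, Nat.lt_succ_of_lt h]
  · have h2 : ¬ j < n + 1 := by omega
    simp [h, h2]

-- Invariant carried through A's first loop: after processing a prefix `pref`, the mask has
-- length pvMaxLen pref and (read with default true) entry j equals ¬ pvColPos pref j.
def pvInv (pref : List (List Int)) (mask : List Bool) : Prop :=
  mask.length = pvMaxLen pref ∧ ∀ j : Nat, mask.getD j true = !pvColPos pref j

theorem pvColPos_append (pref : List (List Int)) (row : List Int) (j : Nat) :
    pvColPos (pref ++ [row]) j
      = (pvColPos pref j || (decide (j < row.length) && decide (row.getD j 0 > 0))) := by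
  simp [pvColPos]

theorem pvMaxLen_append (pref : List (List Int)) (row : List Int) :
    pvMaxLen (pref ++ [row]) = max (pvMaxLen pref) row.length := by
  simp [pvMaxLen]

-- the inner foldl, cut off after the first n indices of the row
def pvInner (row : List Int) (mask : List Bool) (n : Nat) : List Bool :=
  (List.range n).foldl
    (fun m j =>
      let m' := if m.length < j + 1 then m ++ [true] else m
      if row.getD j 0 > 0 then m'.set j false else m')
    mask

theorem pvInner_spec (row : List Int) (mask : List Bool) (n : Nat) :
    (pvInner row mask n).length = max mask.length n ∧
    ∀ j : Nat, (pvInner row mask n).getD j true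
      = (mask.getD j true && !(decide (j < n) && decide (row.getD j 0 > 0))) := by
  induction n with
  | zero => simp [pvInner]
  | succ n ih =>
    obtain ⟨hlen, hget⟩ := ih
    have hstep : pvInner row mask (n + 1)
        = (if row.getD n 0 > 0
             then (if (pvInner row mask n).length < n + 1
                     then pvInner row mask n ++ [true] else pvInner row mask n).set n false
             else (if (pvInner row mask n).length < n + 1
                     then pvInner row mask n ++ [true] else pvInner row mask n)) := by
      rw [pvInner, List.range_succ, List.foldl_append]
      rfl
    set m := pvInner row mask n with hm
    set M := (if m.length < n + 1 then m ++ [true] else m) with hM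
    have hMlen : M.length = max mask.length (n + 1) := by
      rw [hM]; split_ifs with h
      · simp only [List.length_append, List.length_cons, List.length_nil]; omega
      · omega
    have hMget : ∀ j, M.getD j true = m.getD j true := by
      intro j; rw [hM]; split_ifs with h
      · exact pvGetD_append_true m j
      · rfl
    have hnM : n < M.length := by omega
    constructor
    · rw [hstep]; split_ifs with hpos
      · rw [List.length_set]; exact hMlen
      · exact hMlen
    · intro j
      rw [hstep]
      by_cases hpos : row.getD n 0 > 0
      · rw [if_pos hpos, pvGetD_set]
        by_cases hj : j = n
        · rw [if_pos ⟨hj.symm, hnM⟩]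
          have h1 : decide (j < n + 1) = true := by simp [hj]
          have h2 : decide (row.getD j 0 > 0) = true := by rw [hj]; exact decide_eq_true hpos
          rw [h1, h2]
          simp
        · rw [if_neg (by intro hc; exact hj hc.1.symm), hMget j, hget j,
            pvDecide_succ j n hj]
      · rw [if_neg hpos, hMget j, hget j]
        by_cases hj : j = n
        · have h2 : decide (row.getD j 0 > 0) = false := by rw [hj]; exact decide_eq_false hpos
          rw [h2]
          simp
        · rw [pvDecide_succ j n hj]

theorem pvRowStep_inv (pref : List (List Int)) (row : List Int) (mask : List Bool)
    (h : pvInv pref mask) : pvInv (pref ++ [row]) (pvRowStep mask row) := by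
  obtain ⟨hlen, hget⟩ := h
  have hs := pvInner_spec row mask row.length
  constructor
  · rw [show pvRowStep mask row = pvInner row mask row.length from rfl, hs.1,
      pvMaxLen_append, hlen]
  · intro j
    rw [show pvRowStep mask row = pvInner row mask row.length from rfl, hs.2 j,
      hget j, pvColPos_append]
    cases pvColPos pref j <;> simp

theorem pvFoldl_inv (rest pref : List (List Int)) (mask : List Bool)
    (h : pvInv pref mask) : pvInv (pref ++ rest) (rest.foldl pvRowStep mask) := by
  induction rest generalizing pref mask with
  | nil => simpa using h
  | cons r rs ih =>
    have := ih (pref ++ [r]) (pvRowStep mask r) (pvRowStep_inv pref r mask h)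
    simpa using this

theorem pvMask_spec (yValues : List (List Int)) :
    pvInv yValues (yValues.foldl pvRowStep []) := by
  have := pvFoldl_inv yValues [] [] (by constructor <;> simp [pvMaxLen, pvColPos])
  simpa using this

-- A's filtering foldl over the mask equals a map over the kept indices
theorem pvRow_eq (yValues : List (List Int)) (mask : List Bool)
    (h : pvInv yValues mask) (row : List Int) :
    (List.range mask.length).foldl
      (fun acc j => if mask.getD j true then acc else acc ++ [row.getD j 0]) []
      = (pvKeep yValues).map (fun j => row.getD j 0) := by
  obtain ⟨hlen, hget⟩ := h
  have hcong : (List.range mask.length).foldl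
      (fun acc j => if mask.getD j true then acc else acc ++ [row.getD j 0]) ([] : List Int)
      = (List.range mask.length).foldl
      (fun acc j => if (!mask.getD j true) = true then acc ++ [row.getD j 0] else acc) [] := by
    apply PySem.List.foldl_congr_mem
    intro acc j _
    cases hmj : mask.getD j true <;> simp
  rw [hcong, PySem.List.foldl_append_if]
  simp only [List.nil_append]
  congr 1
  rw [hlen]
  unfold pvKeep
  apply List.filter_congr
  intro j hj
  rw [hget j, Bool.not_not]

-- ===== B-side characterisation: pvPeel computes the same map over pvKeep =====

theorem pvZipMapSelf {A B : Type} (l : List A) (g : A -> B) :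
    l.zip (l.map g) = l.map (fun a => (a, g a)) := by
  induction l with
  | nil => simp
  | cons x xs ih => simp [ih]

theorem pvFoldlMax_eq (l : List (List Int)) (a : Nat) :
    l.foldl (fun m r => max m r.length) a = max a (l.foldl (fun m r => max m r.length) 0) := by
  induction l generalizing a with
  | nil => simp
  | cons b t ih => simp only [List.foldl_cons]; rw [ih (max a b.length), ih (max 0 b.length)]; omega

theorem pvMaxLen_cons (r : List Int) (rs : List (List Int)) :
    pvMaxLen (r :: rs) = max r.length (pvMaxLen rs) := by
  unfold pvMaxLen
  simp only [List.foldl_cons]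
  rw [pvFoldlMax_eq]
  omega

theorem pvMaxLen_tail (rows : List (List Int)) :
    pvMaxLen (rows.map List.tail) = pvMaxLen rows - 1 := by
  induction rows with
  | nil => simp [pvMaxLen]
  | cons r rs ih =>
    simp only [List.map_cons]
    rw [pvMaxLen_cons, pvMaxLen_cons, ih, List.length_tail]
    omega

theorem pvMaxLen_pos (rows : List (List Int)) (h : rows.any (fun r => !r.isEmpty) = true) :
    0 < pvMaxLen rows := by
  induction rows with
  | nil => simp at h
  | cons r rs ih =>
    rw [pvMaxLen_cons]
    simp only [List.any_cons, Bool.or_eq_true] at h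
    rcases h with h | h
    · cases r <;> simp_all
    · have := ih h; omega

theorem pvMaxLen_zero (rows : List (List Int)) (h : ¬ rows.any (fun r => !r.isEmpty) = true) :
    pvMaxLen rows = 0 := by
  induction rows with
  | nil => simp [pvMaxLen]
  | cons r rs ih =>
    simp only [List.any_cons, Bool.or_eq_true] at h
    rw [not_or] at h
    rw [pvMaxLen_cons, ih h.2]
    cases r <;> simp_all

theorem pvColPos_zero (rows : List (List Int)) :
    pvColPos rows 0 = rows.any (fun r => !r.isEmpty && decide (r.headD 0 > 0)) := by
  induction rows with
  | nil => simp [pvColPos]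
  | cons r rs ih =>
    simp only [pvColPos, List.any_cons] at ih ⊢
    rw [ih]
    congr 1
    cases r <;> simp [List.getD]

theorem pvColPos_succ (rows : List (List Int)) (j : Nat) :
    pvColPos rows (j + 1) = pvColPos (rows.map List.tail) j := by
  induction rows with
  | nil => simp [pvColPos]
  | cons r rs ih =>
    simp only [pvColPos, List.map_cons, List.any_cons] at ih ⊢
    rw [ih]
    congr 1
    cases r with
    | nil => simp
    | cons a t =>
      simp only [List.length_cons, List.tail_cons, List.getD_cons_succ,
        Nat.add_lt_add_iff_right]
      rfl

theorem pvKeep_peel (rows : List (List Int)) (h : rows.any (fun r => !r.isEmpty) = true) :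
    pvKeep rows
      = (if rows.any (fun r => !r.isEmpty && decide (r.headD 0 > 0)) then [0] else [])
        ++ (pvKeep (rows.map List.tail)).map (· + 1) := by
  obtain ⟨m, hm⟩ : ∃ m, pvMaxLen rows = m + 1 := by
    have := pvMaxLen_pos rows h
    exact ⟨pvMaxLen rows - 1, by omega⟩
  unfold pvKeep
  rw [hm, pvMaxLen_tail, hm]
  simp only [Nat.add_sub_cancel]
  rw [List.range_succ_eq_map]
  simp only [List.filter_cons, List.filter_map]
  rw [pvColPos_zero]
  split_ifs with h0 <;>
    simp [Function.comp_def, pvColPos_succ]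

theorem pvPeel_spec (n : Nat) (rows : List (List Int)) (hn : pvMaxLen rows ≤ n) :
    pvPeel rows = rows.map (fun r => (pvKeep rows).map (fun j => r.getD j 0)) := by
  induction n generalizing rows with
  | zero =>
    have hz : ¬ rows.any (fun r => !r.isEmpty) = true := by
      intro h
      have := pvMaxLen_pos rows h
      omega
    rw [pvPeel.eq_def, dif_neg hz]
    have : pvKeep rows = [] := by
      unfold pvKeep
      rw [pvMaxLen_zero rows hz]
      simp
    simp [this]
  | succ n ih =>
    by_cases h : rows.any (fun r => !r.isEmpty) = true
    · rw [pvPeel.eq_def, dif_pos h]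
      have htl : pvMaxLen (rows.map List.tail) ≤ n := by
        rw [pvMaxLen_tail]
        have := pvMaxLen_pos rows h
        omega
      rw [ih (rows.map List.tail) htl, pvKeep_peel rows h]
      by_cases hk : rows.any (fun r => !r.isEmpty && decide (r.headD 0 > 0)) = true
      · simp only [hk, if_true]
        have hzip : rows.zip ((rows.map List.tail).map
              (fun r => (pvKeep (rows.map List.tail)).map (fun j => r.getD j 0)))
            = rows.map (fun r =>
                (r, (pvKeep (rows.map List.tail)).map (fun j => r.tail.getD j 0))) := by
          rw [List.map_map]
          simpa [Function.comp_def] using pvZipMapSelf rows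
            (fun r : List Int => (pvKeep (rows.map List.tail)).map (fun j => r.tail.getD j 0))
        rw [hzip, List.map_map]
        apply List.map_congr_left
        intro r _
        simp [List.map_map, Function.comp_def, List.getD]
        cases r <;> rfl
      · simp only [hk, List.map_map]
        apply List.map_congr_left
        intro r _
        simp [List.map_map, Function.comp_def]
    · rw [pvPeel.eq_def, dif_neg h]
      have : pvKeep rows = [] := by
        unfold pvKeep
        rw [pvMaxLen_zero rows h]
        simp
      simp [this]

-- ===== VERDICT (by name: the statement is the Claim_ definition above) =====
theorem handleNonPositives_spec : Claim_equal_handleNonPositives := by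
  intro yValues _ _
  unfold Spec_handleNonPositives handleNonPositives handleNonPositives_alt
  rw [pvPeel_spec (pvMaxLen yValues) yValues le_rfl]
  apply List.map_congr_left
  intro row _
  exact pvRow_eq yValues _ (pvMask_spec yValues) row
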